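-- pv_equiv track=rewrite | github.com/maxipdev/Introduccion-a-la-programacion-1-UBA | Guia7.py | filas_ordenadas
-- ===== SOURCE A (Python) =====
-- def ordenados(lista: list[int]) -> bool:
--     for i in range(len(lista) - 1):
--         if lista[i] > lista[i + 1]:
--             return False
--     return True
--
-- def filas_ordenadas(matriz) :
--     res = []
--     for i in matriz:
--         if ordenados(i):
--             res.append(True)
--         else:
--             res.append(False)
--     return res
-- ===== SOURCE B (Python) =====
-- def filas_ordenadas(matriz):
--     return [fila == sorted(fila) for fila in matriz]
-- ===== Notes on version B (the rewrite author's own statement) =====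
-- stated objective: simpler
-- what changed: Replaces the index-based adjacent-pair scan helper with a one-line comprehension comparing each row to its sorted copy.
import Mathlib
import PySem

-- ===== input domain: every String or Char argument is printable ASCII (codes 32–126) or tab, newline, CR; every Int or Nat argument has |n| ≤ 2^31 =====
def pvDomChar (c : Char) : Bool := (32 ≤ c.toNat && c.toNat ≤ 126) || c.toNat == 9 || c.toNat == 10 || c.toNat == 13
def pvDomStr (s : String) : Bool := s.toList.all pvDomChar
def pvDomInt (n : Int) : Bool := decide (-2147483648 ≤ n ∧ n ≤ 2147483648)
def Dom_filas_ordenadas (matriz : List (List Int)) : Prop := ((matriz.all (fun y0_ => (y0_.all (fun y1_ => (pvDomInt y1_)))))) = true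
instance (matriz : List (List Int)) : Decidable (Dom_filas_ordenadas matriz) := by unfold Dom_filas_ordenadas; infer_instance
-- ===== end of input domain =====

-- B replaces the pairwise adjacent scan with comparing each row to its sorted copy; same return value.
-- ===== PORT A =====
-- for i in range(len(lista)-1): if lista[i] > lista[i+1]: return False / return True
def ordenadosGo (lista : List Int) : List Int → Bool
  | [] => true
  | i :: rest =>
      if PySem.List.pyGetD lista i 0 > PySem.List.pyGetD lista (i + 1) 0 then false
      else ordenadosGo lista rest

def ordenados (lista : List Int) : Bool :=
  ordenadosGo lista (PySem.List.pyRange 0 ((lista.length : Int) - 1) 1)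

def filas_ordenadas (matriz : List (List Int)) : List Bool :=
  matriz.foldl (fun res i => res ++ [if ordenados i then true else false]) []

-- ===== PORT B =====
def filas_ordenadas_alt (matriz : List (List Int)) : List Bool :=
  matriz.map (fun fila => decide (fila = PySem.List.sorted fila (fun x => x)))

-- ===== PRECONDITION & SPEC =====
def Spec_filas_ordenadas (matriz : List (List Int)) (out : List Bool) : Prop := out = filas_ordenadas_alt matriz
instance (matriz : List (List Int)) (out : List Bool) : Decidable (Spec_filas_ordenadas matriz out) := by unfold Spec_filas_ordenadas; infer_instance

-- ===== CLAIM (what is proved, stated in full; the proofs are below) =====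
def Claim_equal_filas_ordenadas : Prop := ∀ (matriz : List (List Int)), Dom_filas_ordenadas matriz → Spec_filas_ordenadas matriz (filas_ordenadas matriz)

-- ===== LEMMAS AND PROOFS =====

lemma ordenadosGo_spec (lista : List Int) (idxs : List Int)
    (h : ∀ i ∈ idxs, 0 ≤ i ∧ i + 1 < (lista.length : Int)) :
    ordenadosGo lista idxs =
      decide (∀ i ∈ idxs, PySem.List.pyGetD lista i 0 ≤ PySem.List.pyGetD lista (i + 1) 0) := by
  induction idxs with
  | nil => simp [ordenadosGo]
  | cons i rest ih =>
    simp only [ordenadosGo]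
    by_cases hgt : PySem.List.pyGetD lista i 0 > PySem.List.pyGetD lista (i + 1) 0
    · simp [hgt, not_le.mpr hgt]
    · have := ih (fun j hj => h j (List.mem_cons_of_mem _ hj))
      simp [hgt, this, not_lt.mp hgt]

lemma ordenados_eq (fila : List Int) :
    ordenados fila = decide (fila = PySem.List.sorted fila (fun x => x)) := by
  have hmem : ∀ i ∈ PySem.List.pyRange 0 ((fila.length : Int) - 1) 1,
      0 ≤ i ∧ i + 1 < (fila.length : Int) := by
    intro i hi
    rw [PySem.List.mem_pyRange_one] at hi
    omega
  rw [ordenados, ordenadosGo_spec fila _ hmem]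
  have key : (∀ i ∈ PySem.List.pyRange 0 ((fila.length : Int) - 1) 1,
      PySem.List.pyGetD fila i 0 ≤ PySem.List.pyGetD fila (i + 1) 0) ↔
      fila = PySem.List.sorted fila (fun x => x) := by
    constructor
    · intro hall
      have hpw : fila.Pairwise (· ≤ ·) := by
        rw [← List.isChain_iff_pairwise, List.isChain_iff_getElem]
        intro k hk
        have hk' : (k : Int) + 1 < (fila.length : Int) := by omega
        have := hall (k : Int) (by rw [PySem.List.mem_pyRange_one]; omega)
        rw [PySem.List.pyGetD_eq_getElem fila 0 (by omega) (by omega),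
            PySem.List.pyGetD_eq_getElem fila 0 (by omega) hk'] at this
        simpa using this
      exact (PySem.List.sorted_eq_self_of_pairwise fila _ hpw).symm
    · intro heq
      have hpw : fila.Pairwise (· ≤ ·) := by
        have := PySem.List.sorted_pairwise fila (fun x => x)
        rw [← heq] at this
        simpa using this
      intro i hi
      rw [PySem.List.mem_pyRange_one] at hi
      have h0 : 0 ≤ i := hi.1
      have h1 : i + 1 < (fila.length : Int) := by omega
      rw [PySem.List.pyGetD_eq_getElem fila 0 h0 (by omega),
          PySem.List.pyGetD_eq_getElem fila 0 (by omega) h1]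
      have hij : i.toNat < (i + 1).toNat := by omega
      exact List.pairwise_iff_getElem.mp hpw i.toNat (i+1).toNat (by omega) (by omega) hij
  simp only [key]

-- ===== VERDICT (by name: the statement is the Claim_ definition above) =====
theorem filas_ordenadas_spec : Claim_equal_filas_ordenadas := by
  intro matriz _
  unfold Spec_filas_ordenadas filas_ordenadas filas_ordenadas_alt
  rw [PySem.List.foldl_append_singleton_eq_map]
  refine List.map_congr_left (fun fila _ => ?_)
  rw [ordenados_eq]
  cases decide (fila = PySem.List.sorted fila (fun x => x)) <;> rfl
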